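-- pv_equiv track=rewrite | github.com/sneibarg/springs-of-mud-util | MigrateRiversOfMud/entity/Mobile.py | _parse_multiline_terminated_string
-- ===== SOURCE A (Python) =====
-- def _parse_multiline_terminated_string(lines, index):
--     """
--     Parses a multiline string terminated with a tilde (~).
--     """
--     description_lines = []
--     while index < len(lines):
--         line = lines[index].strip()
--         if line == '~':
--             index += 1
--             break
--         description_lines.append(line)
--         index += 1
--
--     return "\n".join(description_lines), index
-- ===== SOURCE B (Python) =====
-- def _parse_multiline_terminated_string(lines, index):
--     stripped = [l.strip() for l in lines[index:]]
--     try: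
--         pos = stripped.index('~')
--         return "\n".join(stripped[:pos]), index + pos + 1
--     except ValueError:
--         return "\n".join(stripped), index + len(stripped)
-- ===== Notes on version B (the rewrite author's own statement) =====
-- stated objective: alternative
-- what changed: Replaced A's collect-and-advance cursor loop by a strip-everything map over the tail slice, a library list.index('~') search with ValueError handling to locate the terminator, and slice/arithmetic to produce the joined text and final cursor.
-- outside the precondition, e.g. on _parse_multiline_terminated_string(['a', 'b'], -1): A returns ('b\na\nb', 2), B returns ('b', 0)
import Mathlib
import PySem

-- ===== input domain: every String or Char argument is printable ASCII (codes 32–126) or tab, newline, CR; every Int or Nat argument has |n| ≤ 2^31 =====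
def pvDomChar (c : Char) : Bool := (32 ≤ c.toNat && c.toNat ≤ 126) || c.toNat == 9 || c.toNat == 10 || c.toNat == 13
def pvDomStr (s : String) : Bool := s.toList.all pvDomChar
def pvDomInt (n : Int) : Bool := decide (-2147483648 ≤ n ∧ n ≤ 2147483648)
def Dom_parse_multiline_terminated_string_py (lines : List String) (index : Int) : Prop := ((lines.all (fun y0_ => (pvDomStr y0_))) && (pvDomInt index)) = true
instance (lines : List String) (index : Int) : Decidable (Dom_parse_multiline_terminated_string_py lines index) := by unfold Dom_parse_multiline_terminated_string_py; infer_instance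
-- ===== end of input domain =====

-- B replaces A's collect-and-advance cursor loop by a strip-all map over the tail slice,
-- a library index-of-'~' search, and slice/arithmetic for the text and final cursor
-- (alternative decomposition, same cost).

-- ===== PORT A =====
-- the while loop of A: state = (description_lines accumulator, index)
def pvALoop (lines : List String) (index : Int) (acc : List String) : List String × Int :=
  if _h : index < (lines.length : Int) then
    let line := PySem.Str.strip ((PySem.List.pyGet? lines index).getD "")
    if line == "~" then (acc, index + 1)
    else pvALoop lines (index + 1) (acc ++ [line])
  else (acc, index)
termination_by ((lines.length : Int) - index).toNat
decreasing_by omega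

def parse_multiline_terminated_string_py (lines : List String) (index : Int) : String × Int :=
  let r := pvALoop lines index []
  (PySem.Str.join "\n" r.1, r.2)

-- ===== PORT B =====
def parse_multiline_terminated_string_py_alt (lines : List String) (index : Int) : String × Int :=
  let stripped := (PySem.List.slice lines (some index) none).map PySem.Str.strip
  match PySem.List.index? stripped "~" with
  | some pos =>
      (PySem.Str.join "\n" (PySem.List.slice stripped none (some (pos : Int))), index + pos + 1)
  | none => (PySem.Str.join "\n" stripped, index + stripped.length)

-- ===== PRECONDITION & SPEC =====
-- Pre_ excludes negative index, a corner no caller specifies: there A's per-element negative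
-- indexing wraps around and re-reads lines while B's tail slice reads a different portion
-- (both values accidental), and for index < -len(lines) A raises IndexError.
def Pre_parse_multiline_terminated_string_py (lines : List String) (index : Int) : Prop := 0 ≤ index
instance (lines : List String) (index : Int) : Decidable (Pre_parse_multiline_terminated_string_py lines index) := by unfold Pre_parse_multiline_terminated_string_py; infer_instance

def pvWitness_parse_multiline_terminated_string_py : List String × Int := ([" desc ", "line2", "~", "rest"], 0)

def Spec_parse_multiline_terminated_string_py (lines : List String) (index : Int) (out : String × Int) : Prop := out = parse_multiline_terminated_string_py_alt lines index
instance (lines : List String) (index : Int) (out : String × Int) : Decidable (Spec_parse_multiline_terminated_string_py lines index out) := by unfold Spec_parse_multiline_terminated_string_py; infer_instance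

-- ===== CLAIM =====
def Claim_equal_parse_multiline_terminated_string_py : Prop := ∀ (lines : List String) (index : Int), Dom_parse_multiline_terminated_string_py lines index → Pre_parse_multiline_terminated_string_py lines index → Spec_parse_multiline_terminated_string_py lines index (parse_multiline_terminated_string_py lines index)

-- ===== LEMMAS AND PROOFS =====

-- the accumulator of A's loop only ever receives appends
theorem pvALoop_acc (lines : List String) (index : Int) (acc : List String) :
    pvALoop lines index acc = (acc ++ (pvALoop lines index []).1, (pvALoop lines index []).2) := by
  by_cases h : index < (lines.length : Int)
  · by_cases ht : PySem.Str.strip ((PySem.List.pyGet? lines index).getD "") = "~"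
    · rw [pvALoop, pvALoop]; simp [h, ht]
    · rw [pvALoop, pvALoop]
      simp only [h, dif_pos, List.nil_append, beq_iff_eq, ht, if_false]
      rw [pvALoop_acc lines (index + 1) (acc ++ [PySem.Str.strip ((PySem.List.pyGet? lines index).getD "")]),
          pvALoop_acc lines (index + 1) [PySem.Str.strip ((PySem.List.pyGet? lines index).getD "")]]
      simp
  · rw [pvALoop, pvALoop]; simp [h]
termination_by ((lines.length : Int) - index).toNat
decreasing_by all_goals omega

-- A's loop from cursor k computes B's index?-and-take decomposition of the stripped tail
theorem pvALoop_eq (lines : List String) (k : Nat) :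
    pvALoop lines (k : Int) [] =
      (match PySem.List.index? ((lines.drop k).map PySem.Str.strip) "~" with
       | some pos => (((lines.drop k).map PySem.Str.strip).take pos, (k : Int) + pos + 1)
       | none => ((lines.drop k).map PySem.Str.strip, (k : Int) + ((lines.drop k).map PySem.Str.strip).length)) := by
  by_cases h : k < lines.length
  · have hdrop : lines.drop k = lines[k] :: lines.drop (k + 1) := List.drop_eq_getElem_cons h
    have hget : (PySem.List.pyGet? lines (k : Int)).getD "" = lines[k] := by
      rw [PySem.List.pyGet?_natCast]; simp [h]
    by_cases ht : PySem.Str.strip lines[k] = "~"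
    · rw [pvALoop]
      simp only [show ((k : Int) < (lines.length : Int)) from by exact_mod_cast h, dif_pos,
        hget, beq_iff_eq, ht, if_true, hdrop, List.map_cons]
      rw [PySem.List.index?_cons_self]
      simp
    · rw [pvALoop]
      simp only [show ((k : Int) < (lines.length : Int)) from by exact_mod_cast h, dif_pos,
        hget, beq_iff_eq, ht, if_false, List.nil_append]
      rw [show (k : Int) + 1 = ((k + 1 : Nat) : Int) by push_cast; ring,
          pvALoop_acc lines ((k + 1 : Nat) : Int), pvALoop_eq lines (k + 1)]
      rw [hdrop, List.map_cons, PySem.List.index?_cons_of_ne _ ht]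
      cases hix : PySem.List.index? ((lines.drop (k + 1)).map PySem.Str.strip) "~" with
      | none => simp; ring
      | some pos => simp [List.take_succ_cons]; ring
  · have hdrop : lines.drop k = [] := List.drop_eq_nil_of_le (by omega)
    rw [pvALoop]
    simp [show ¬ ((k : Int) < (lines.length : Int)) from by exact_mod_cast h, hdrop,
      PySem.List.index?]
termination_by lines.length - k
decreasing_by omega

-- ===== VERDICT =====
theorem parse_multiline_terminated_string_py_spec : Claim_equal_parse_multiline_terminated_string_py := by
  intro lines index _hdom hpre
  unfold Spec_parse_multiline_terminated_string_py parse_multiline_terminated_string_py parse_multiline_terminated_string_py_alt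
  obtain ⟨k, rfl⟩ : ∃ k : Nat, index = (k : Int) := ⟨index.toNat, (Int.toNat_of_nonneg hpre).symm⟩
  rw [pvALoop_eq lines k, PySem.List.slice_from_natCast]
  cases hix : PySem.List.index? ((lines.drop k).map PySem.Str.strip) "~" with
  | none => simp only [hix]
  | some pos => simp only [hix, PySem.List.slice_to_natCast]
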